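-- pv_equiv track=rewrite | github.com/cartkid/advent-of-code | src/year_2022/day_10/code.py | get_curr_sprite
-- ===== SOURCE A (Python) =====
-- def get_curr_sprite(curr_x: int) -> list[str]:
--     return_me: list[str] = []
--     for i in range(0, 40):
--         if i in [curr_x - 1, curr_x, curr_x + 1]:
--             return_me.append("#")
--         else:
--             return_me.append(" ")
--     return return_me
-- ===== SOURCE B (Python) =====
-- def get_curr_sprite(curr_x: int) -> list[str]:
--     result = [" "] * 40
--     for d in (-1, 0, 1):
--         idx = curr_x + d
--         if 0 <= idx < 40:
--             result[idx] = "#"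
--     return result
-- ===== Notes on version B (the rewrite author's own statement) =====
-- stated objective: simpler
-- what changed: Instead of scanning every screen position and testing membership in a sprite list, B builds a row of spaces once and patches the at-most-three in-range sprite cells directly.
import Mathlib
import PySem

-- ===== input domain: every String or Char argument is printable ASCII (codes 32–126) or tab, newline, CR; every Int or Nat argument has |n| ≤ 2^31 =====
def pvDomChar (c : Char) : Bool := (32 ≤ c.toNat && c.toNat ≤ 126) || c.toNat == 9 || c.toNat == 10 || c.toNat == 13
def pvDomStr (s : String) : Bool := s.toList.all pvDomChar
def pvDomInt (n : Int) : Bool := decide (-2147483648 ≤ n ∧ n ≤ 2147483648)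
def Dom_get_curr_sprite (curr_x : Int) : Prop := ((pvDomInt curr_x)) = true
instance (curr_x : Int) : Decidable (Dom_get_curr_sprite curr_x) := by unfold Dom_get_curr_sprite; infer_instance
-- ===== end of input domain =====

-- B builds the 40-space row once and patches the at-most-three in-range sprite cells, instead of A's scan of all 40 positions with a membership test each.

-- ===== PORT A =====
def get_curr_sprite (curr_x : Int) : List String :=
  (PySem.List.pyRange 0 40 1).foldl
    (fun return_me i =>
      if i == curr_x - 1 || i == curr_x || i == curr_x + 1 then
        return_me ++ ["#"]
      else
        return_me ++ [" "])
    []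

-- ===== PORT B =====
-- the body of B's loop: result[idx] = "#" guarded by 0 <= idx < 40
def pvSetHash (result : List String) (idx : Int) : List String :=
  if 0 ≤ idx ∧ idx < 40 then result.set idx.toNat "#" else result

def get_curr_sprite_alt (curr_x : Int) : List String :=
  [(-1 : Int), 0, 1].foldl (fun result d => pvSetHash result (curr_x + d))
    (List.replicate 40 " ")

-- ===== PRECONDITION & SPEC =====
def Spec_get_curr_sprite (curr_x : Int) (out : List String) : Prop := out = get_curr_sprite_alt curr_x
instance (curr_x : Int) (out : List String) : Decidable (Spec_get_curr_sprite curr_x out) := by unfold Spec_get_curr_sprite; infer_instance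

-- ===== CLAIM (what is proved, stated in full; the proofs are below) =====
def Claim_equal_get_curr_sprite : Prop := ∀ (curr_x : Int), Dom_get_curr_sprite curr_x → Spec_get_curr_sprite curr_x (get_curr_sprite curr_x)

-- ===== LEMMAS AND PROOFS =====

-- A's append-loop is a map over the range list
theorem foldl_append_map {α β : Type} (p : α → Bool) (u v : β) :
    ∀ (l : List α) (acc : List β),
      l.foldl (fun a i => if p i then a ++ [u] else a ++ [v]) acc
        = acc ++ l.map (fun i => if p i then u else v) := by
  intro l
  induction l with
  | nil => intro acc; simp
  | cons x xs ih =>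
    intro acc
    by_cases hp : p x <;> simp [List.foldl, hp, ih]

theorem get_curr_sprite_eq_map (c : Int) :
    get_curr_sprite c =
      (List.range 40).map
        (fun n => if (Int.ofNat n == c - 1 || Int.ofNat n == c || Int.ofNat n == c + 1) then "#" else " ") := by
  unfold get_curr_sprite
  have hr : PySem.List.pyRange 0 40 1 = (List.range 40).map Int.ofNat := by decide
  rw [foldl_append_map (fun i => i == c - 1 || i == c || i == c + 1) "#" " ", hr,
    List.map_map]
  rfl

theorem length_pvSetHash (l : List String) (i : Int) : (pvSetHash l i).length = l.length := by
  unfold pvSetHash; split <;> simp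

theorem get_curr_sprite_spec_aux (c : Int) : get_curr_sprite c = get_curr_sprite_alt c := by
  rw [get_curr_sprite_eq_map]
  unfold get_curr_sprite_alt
  simp only [List.foldl]
  apply List.ext_getElem
  · simp [length_pvSetHash]
  · intro j hj hj'
    simp only [List.length_map, List.length_range] at hj
    simp only [List.getElem_map, List.getElem_range]
    unfold pvSetHash
    simp only [beq_iff_eq, Bool.or_eq_true, Int.ofNat_eq_natCast]
    split_ifs <;>
      simp only [List.getElem_set, List.getElem_replicate] <;>
      (try split_ifs) <;> first | rfl | omega

-- ===== VERDICT (by name: the statement is the Claim_ definition above) =====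
theorem get_curr_sprite_spec : Claim_equal_get_curr_sprite := by
  intro c _
  show get_curr_sprite c = get_curr_sprite_alt c
  exact get_curr_sprite_spec_aux c
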